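-- pv_equiv track=rewrite | github.com/insipel/achked | python3/linkedlist/tiny_url.py | shortURLtoID
-- ===== SOURCE A (Python) =====
-- def shortURLtoID(shortURL):
--     id = 0 # initialize result
--
--     # A simple base conversion logic
--     #for (int i=0; i < shortURL.length(); i++)
--     for i in range(len(shortURL)):
--
--         if ('a' <= shortURL[i] and shortURL[i] <= 'z'):
--             id = id*62 + ord(shortURL[i]) - ord('a')
--
--         if ('A' <= shortURL[i] and shortURL[i] <= 'Z'):
--             # 26 is the offset in the map[] string for chars starting
--             # with A
--             id = id*62 + ord(shortURL[i]) - ord('A') + 26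
--
--         if ('0' <= shortURL[i] and shortURL[i] <= '9'):
--             # 52 is the offset in the map[] string for chars starting
--             # with 0
--             id = id*62 + ord(shortURL[i]) - ord('0') + 52
--
--     return id
-- ===== SOURCE B (Python) =====
-- def shortURLtoID(shortURL):
--     # Collect base-62 digit values of the valid characters, skipping others.
--     digits = []
--     for c in shortURL:
--         if 'a' <= c <= 'z':
--             digits.append(ord(c) - ord('a'))
--         elif 'A' <= c <= 'Z':
--             digits.append(ord(c) - ord('A') + 26)
--         elif '0' <= c <= '9':
--             digits.append(ord(c) - ord('0') + 52)
--     # Back-to-front positional-weight sum: least-significant digit first,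
--     # weight 62**position, instead of A's left-to-right Horner accumulation.
--     total = 0
--     w = 1
--     for d in reversed(digits):
--         total += d * w
--         w *= 62
--     return total
-- ===== Notes on version B (the rewrite author's own statement) =====
-- stated objective: alternative
-- what changed: B first filters the string into a list of base-62 digit values, then sums them back-to-front with an explicit positional weight (total += d*w, w *= 62), instead of A's single left-to-right pass with three sequential if-branches doing Horner accumulation.
import Mathlib
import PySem

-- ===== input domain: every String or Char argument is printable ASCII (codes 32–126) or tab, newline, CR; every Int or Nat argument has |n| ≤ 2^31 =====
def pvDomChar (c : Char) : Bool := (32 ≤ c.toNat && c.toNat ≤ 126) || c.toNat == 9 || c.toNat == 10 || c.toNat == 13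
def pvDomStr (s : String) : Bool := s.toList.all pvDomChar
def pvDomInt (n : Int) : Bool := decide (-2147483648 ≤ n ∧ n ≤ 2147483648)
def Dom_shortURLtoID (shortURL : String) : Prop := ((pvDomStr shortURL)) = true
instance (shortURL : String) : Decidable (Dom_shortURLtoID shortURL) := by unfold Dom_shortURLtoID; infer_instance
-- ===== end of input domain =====

-- B filters the digit values out first and sums them back-to-front with an explicit positional
-- weight, instead of A's left-to-right Horner accumulation (objective: alternative decomposition).
-- Python one-char string comparisons ('a' <= c) compare code points; both ports render them as
-- Nat comparisons on c.toNat, which is exact.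

-- ===== PORT A =====
-- A's loop body: three sequential (non-elif) if-updates of the accumulator, as in the Python.
def pvStepA (id0 : Int) (c : Char) : Int :=
  let id1 := if 97 ≤ c.toNat ∧ c.toNat ≤ 122 then id0 * 62 + (c.toNat : Int) - 97 else id0
  let id2 := if 65 ≤ c.toNat ∧ c.toNat ≤ 90 then id1 * 62 + (c.toNat : Int) - 65 + 26 else id1
  let id3 := if 48 ≤ c.toNat ∧ c.toNat ≤ 57 then id2 * 62 + (c.toNat : Int) - 48 + 52 else id2
  id3

def shortURLtoID (shortURL : String) : Int :=
  shortURL.toList.foldl pvStepA 0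

-- ===== PORT B =====
-- B's digit map: the elif chain of Source B.
def pvDigitVal? (c : Char) : Option Int :=
  if 97 ≤ c.toNat ∧ c.toNat ≤ 122 then some ((c.toNat : Int) - 97)
  else if 65 ≤ c.toNat ∧ c.toNat ≤ 90 then some ((c.toNat : Int) - 65 + 26)
  else if 48 ≤ c.toNat ∧ c.toNat ≤ 57 then some ((c.toNat : Int) - 48 + 52)
  else none

-- Source B's second loop: 'for d in reversed(digits): total += d*w; w *= 62'
def shortURLtoID_alt (shortURL : String) : Int :=
  let digits := shortURL.toList.filterMap pvDigitVal?
  (digits.reverse.foldl (fun (tw : Int × Int) d => (tw.1 + d * tw.2, tw.2 * 62)) (0, 1)).1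

-- ===== PRECONDITION & SPEC =====
def Spec_shortURLtoID (shortURL : String) (out : Int) : Prop := out = shortURLtoID_alt shortURL
instance (shortURL : String) (out : Int) : Decidable (Spec_shortURLtoID shortURL out) := by unfold Spec_shortURLtoID; infer_instance

-- ===== CLAIM (what is proved, stated in full; the proofs are below) =====
def Claim_equal_shortURLtoID : Prop := ∀ (shortURL : String), Dom_shortURLtoID shortURL → Spec_shortURLtoID shortURL (shortURLtoID shortURL)

-- ===== LEMMAS AND PROOFS =====

-- A's three sequential ifs act like B's elif chain (the three ranges are disjoint).
theorem pvStepA_eq (id0 : Int) (c : Char) :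
    pvStepA id0 c = match pvDigitVal? c with
      | some d => id0 * 62 + d
      | none => id0 := by
  unfold pvStepA pvDigitVal?
  split_ifs <;> first | rfl | (exfalso; omega) | ring

-- Horner fold over the raw characters = Horner fold over the filtered digit list.
theorem pv_fold_filter (l : List Char) (acc : Int) :
    l.foldl pvStepA acc
      = (l.filterMap pvDigitVal?).foldl (fun a d => a * 62 + d) acc := by
  induction l generalizing acc with
  | nil => rfl
  | cons c l ih =>
      cases h : pvDigitVal? c <;>
        simp [List.foldl_cons, pvStepA_eq, h, ih]

-- the Horner value of a digit list
def pvVal (ds : List Int) : Int := ds.foldl (fun a d => a * 62 + d) 0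

theorem pv_horner_acc (ds : List Int) : ∀ acc : Int,
    ds.foldl (fun a d => a * 62 + d) acc = acc * 62 ^ ds.length + pvVal ds := by
  induction ds with
  | nil => intro acc; simp [pvVal]
  | cons d ds ih =>
      intro acc
      rw [List.foldl_cons, ih (acc * 62 + d), List.length_cons]
      have h2 : pvVal (d :: ds) = (0 * 62 + d) * 62 ^ ds.length + pvVal ds := by
        show List.foldl _ 0 (d :: ds) = _
        rw [List.foldl_cons, ih (0 * 62 + d)]
      rw [h2]
      ring

-- the reversed weighted-sum loop computes (t + w·value, w·62^n)
theorem pv_revsum (ds : List Int) : ∀ t w : Int,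
    ds.reverse.foldl (fun (tw : Int × Int) d => (tw.1 + d * tw.2, tw.2 * 62)) (t, w)
      = (t + w * pvVal ds, w * 62 ^ ds.length) := by
  induction ds with
  | nil => intro t w; simp [pvVal]
  | cons d ds ih =>
      intro t w
      have hval : pvVal (d :: ds) = d * 62 ^ ds.length + pvVal ds := by
        rw [pvVal, List.foldl_cons, pv_horner_acc ds (0 * 62 + d)]
        ring
      simp only [List.reverse_cons, List.foldl_append, ih, List.foldl_cons, List.foldl_nil,
        hval, List.length_cons]
      rw [Prod.mk.injEq]
      constructor <;> ring

-- ===== VERDICT (by name: the statement is the Claim_ definition above) =====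
theorem shortURLtoID_spec : Claim_equal_shortURLtoID := by
  intro s _
  show shortURLtoID s = shortURLtoID_alt s
  simp only [shortURLtoID, shortURLtoID_alt, pv_fold_filter, pv_revsum]
  simp [pvVal]
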